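-- pv_equiv track=rewrite | github.com/dogunyoye/advent-of-code-2024 | day20/day20.py | __bfs_constrained
-- ===== SOURCE A (Python) =====
-- from collections import deque, defaultdict
--
-- def __bfs_constrained(grid, start, end, limit) -> int:
--     queue, visited = deque(), set()
--     queue.append((start, 0))
--
--     while len(queue) != 0:
--         current_position = queue.popleft()
--         i, j = current_position[0]
--         steps = current_position[1]
--
--         if steps >= limit:
--             continue
--
--         if current_position[0] == end:
--             return steps
--
--         neighbors = [(i, j - 1), (i - 1, j), (i, j + 1), (i + 1, j)]
--         for n in neighbors:
--             if n in grid and grid[n] != '#' and n not in visited: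
--                 queue.append((n, steps + 1))
--                 visited.add(n)
--
--     return -1
-- ===== SOURCE B (Python) =====
-- def __bfs_constrained(grid, start, end, limit) -> int:
--     # Level-synchronous BFS: advance a whole frontier one step at a time.
--     frontier = [start]
--     visited = set()
--     d = 0
--     while frontier and d < limit:
--         if end in frontier:
--             return d
--         nxt = []
--         for (i, j) in frontier:
--             for n in ((i, j - 1), (i - 1, j), (i, j + 1), (i + 1, j)):
--                 if n in grid and grid[n] != '#' and n not in visited:
--                     nxt.append(n)
--                     visited.add(n)
--         frontier = nxt
--         d += 1
--     return -1
-- ===== Notes on version B (the rewrite author's own statement) =====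
-- stated objective: alternative
-- what changed: Replaces A's one-node-at-a-time deque BFS (queue of (position, steps) pairs, popleft per node) by a level-synchronous BFS that advances a whole frontier list one step per outer iteration, counting the depth d and stopping when d reaches the exclusive limit.
import Mathlib
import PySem

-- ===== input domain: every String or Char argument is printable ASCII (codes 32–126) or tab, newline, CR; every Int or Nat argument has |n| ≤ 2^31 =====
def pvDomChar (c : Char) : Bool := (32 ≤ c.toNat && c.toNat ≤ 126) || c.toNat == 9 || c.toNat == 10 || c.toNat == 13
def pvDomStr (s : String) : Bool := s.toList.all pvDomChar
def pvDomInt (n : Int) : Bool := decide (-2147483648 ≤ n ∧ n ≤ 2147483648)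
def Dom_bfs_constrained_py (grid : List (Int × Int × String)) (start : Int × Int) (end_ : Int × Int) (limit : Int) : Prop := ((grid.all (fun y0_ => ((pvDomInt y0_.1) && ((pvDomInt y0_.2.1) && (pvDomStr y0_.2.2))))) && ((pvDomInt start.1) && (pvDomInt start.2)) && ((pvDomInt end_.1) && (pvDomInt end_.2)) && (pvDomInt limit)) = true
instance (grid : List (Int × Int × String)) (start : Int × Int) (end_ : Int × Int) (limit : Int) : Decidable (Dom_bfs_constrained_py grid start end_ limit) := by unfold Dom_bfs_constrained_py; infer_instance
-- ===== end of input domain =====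

-- B replaces A's one-node-at-a-time deque BFS by a level-synchronous frontier BFS (whole
-- frontier advanced per step, loop bounded by the step limit); same return value, no speed claim.

-- shared representation shim: the dict argument arrives as a list of (i, j, ch) triples;
-- building the PySem.Dict by insertion models Python's dict construction (last value wins).
def pvGrid (grid : List (Int × Int × String)) : PySem.Dict (Int × Int) String :=
  grid.foldl (fun d e => PySem.Dict.insert d (e.1, e.2.1) e.2.2) PySem.Dict.empty

-- shared: the neighbor list [(i, j-1), (i-1, j), (i, j+1), (i+1, j)] (identical in both Pythons)
def pvNbrs (p : Int × Int) : List (Int × Int) :=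
  [(p.1, p.2 - 1), (p.1 - 1, p.2), (p.1, p.2 + 1), (p.1 + 1, p.2)]

-- shared: the condition 'n in grid and grid[n] != "#" and n not in visited' (identical in both Pythons)
def pvOk (D : PySem.Dict (Int × Int) String) (V : PySem.Set (Int × Int)) (n : Int × Int) : Bool :=
  match PySem.Dict.get? D n with
  | some v => (v != "#") && !(PySem.Set.contains V n)
  | none => false

-- ===== PORT A =====
-- A's inner 'for n in neighbors' loop: append (n, steps+1) to the queue, add n to visited
def pvExpandA (D : PySem.Dict (Int × Int) String) (steps : Int) :
    List (Int × Int) → List ((Int × Int) × Int) → PySem.Set (Int × Int) →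
    List ((Int × Int) × Int) × PySem.Set (Int × Int)
  | [], q, V => (q, V)
  | n :: ns, q, V =>
      if pvOk D V n then pvExpandA D steps ns (q ++ [(n, steps + 1)]) (PySem.Set.add V n)
      else pvExpandA D steps ns q V

-- A's 'while len(queue) != 0' loop (fuel makes the recursion total; grid.length + 2 always suffices,
-- since every enqueue after the first adds a fresh grid key to visited)
def pvLoopA (D : PySem.Dict (Int × Int) String) (end_ : Int × Int) (limit : Int) :
    Nat → List ((Int × Int) × Int) → PySem.Set (Int × Int) → Int
  | 0, _, _ => -1
  | _ + 1, [], _ => -1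
  | f + 1, c :: rest, V =>
      if limit ≤ c.2 then pvLoopA D end_ limit f rest V
      else if c.1 = end_ then c.2
      else
        let s := pvExpandA D c.2 (pvNbrs c.1) rest V
        pvLoopA D end_ limit f s.1 s.2

def bfs_constrained_py (grid : List (Int × Int × String)) (start : Int × Int) (end_ : Int × Int) (limit : Int) : Int :=
  pvLoopA (pvGrid grid) end_ limit (grid.length + 2) [(start, 0)] PySem.Set.empty

-- ===== PORT B =====
-- B's inner 'for n in (…)' loop: append n to the next frontier, add n to visited
def pvExpandB (D : PySem.Dict (Int × Int) String) :
    List (Int × Int) → List (Int × Int) → PySem.Set (Int × Int) →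
    List (Int × Int) × PySem.Set (Int × Int)
  | [], nxt, V => (nxt, V)
  | n :: ns, nxt, V =>
      if pvOk D V n then pvExpandB D ns (nxt ++ [n]) (PySem.Set.add V n)
      else pvExpandB D ns nxt V

-- B's 'for (i, j) in frontier' loop: expand every frontier node
def pvLevelB (D : PySem.Dict (Int × Int) String) :
    List (Int × Int) → List (Int × Int) → PySem.Set (Int × Int) →
    List (Int × Int) × PySem.Set (Int × Int)
  | [], nxt, V => (nxt, V)
  | p :: F, nxt, V =>
      let s := pvExpandB D (pvNbrs p) nxt V
      pvLevelB D F s.1 s.2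

-- B's 'while frontier and d < limit' loop; terminates because d increases towards limit
def pvLoopB (D : PySem.Dict (Int × Int) String) (end_ : Int × Int) (limit : Int)
    (d : Int) (F : List (Int × Int)) (V : PySem.Set (Int × Int)) : Int :=
  if h : F = [] ∨ limit ≤ d then -1
  else if end_ ∈ F then d
  else
    let s := pvLevelB D F [] V
    pvLoopB D end_ limit (d + 1) s.1 s.2
termination_by (limit - d).toNat
decreasing_by
  rw [not_or] at h
  omega

def bfs_constrained_py_alt (grid : List (Int × Int × String)) (start : Int × Int) (end_ : Int × Int) (limit : Int) : Int :=
  pvLoopB (pvGrid grid) end_ limit 0 [start] PySem.Set.empty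

-- ===== PRECONDITION & SPEC =====
def Spec_bfs_constrained_py (grid : List (Int × Int × String)) (start : Int × Int) (end_ : Int × Int) (limit : Int) (out : Int) : Prop := out = bfs_constrained_py_alt grid start end_ limit
instance (grid : List (Int × Int × String)) (start : Int × Int) (end_ : Int × Int) (limit : Int) (out : Int) : Decidable (Spec_bfs_constrained_py grid start end_ limit out) := by unfold Spec_bfs_constrained_py; infer_instance

-- ===== CLAIM (what is proved, stated in full; the proofs are below) =====
def Claim_equal_bfs_constrained_py : Prop := ∀ (grid : List (Int × Int × String)) (start : Int × Int) (end_ : Int × Int) (limit : Int), Dom_bfs_constrained_py grid start end_ limit → Spec_bfs_constrained_py grid start end_ limit (bfs_constrained_py grid start end_ limit)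

-- ===== LEMMAS AND PROOFS =====

-- number of grid keys not yet visited: bounds the enqueues A can still perform
def pvU (D : PySem.Dict (Int × Int) String) (V : PySem.Set (Int × Int)) : Nat :=
  ((PySem.Dict.keys D).filter (fun k => !(PySem.Set.contains V k))).length

theorem pvOk_facts {D : PySem.Dict (Int × Int) String} {V : PySem.Set (Int × Int)} {n : Int × Int}
    (h : pvOk D V n = true) : n ∈ PySem.Dict.keys D ∧ n ∉ V := by
  unfold pvOk at h
  cases hg : PySem.Dict.get? D n with
  | none => rw [hg] at h; cases h
  | some v =>
      rw [hg] at h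
      simp only [Bool.and_eq_true, Bool.not_eq_true'] at h
      constructor
      · by_contra hmem
        rw [← PySem.Dict.get?_eq_none_iff_not_mem_keys] at hmem
        rw [hmem] at hg; cases hg
      · intro hv
        have : PySem.Set.contains V n = true := (PySem.Set.contains_iff V n).mpr hv
        rw [this] at h
        exact absurd h.2 (by simp)

theorem pvFilter_len {V K : List (Int × Int)} {n : Int × Int}
    (hm : n ∈ K) (hc : n ∉ V) :
    (K.filter (fun k => decide (k ∉ V ∧ k ≠ n))).length + 1 ≤
      (K.filter (fun k => decide (k ∉ V))).length := by
  induction K with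
  | nil => simp at hm
  | cons a K ih =>
      by_cases han : a = n
      · subst han
        have hsplit : K.filter (fun k => decide (k ∉ V ∧ k ≠ a)) =
            (K.filter (fun k => decide (k ∉ V))).filter (fun k => decide (k ≠ a)) := by
          rw [List.filter_filter]
          apply List.filter_congr
          intro x _
          by_cases h1 : x ∈ V <;> by_cases h2 : x = a <;> simp [h1, h2]
        have hlen := List.length_filter_le (fun k => decide (k ≠ a))
          (K.filter (fun k => decide (k ∉ V)))
        rw [List.filter_cons, List.filter_cons, if_neg (by simp), if_pos (by simp [hc]),
          hsplit, List.length_cons]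
        omega
      · have hmm : n ∈ K := by
          cases hm with
          | head => exact absurd rfl han
          | tail _ h => exact h
        have heq : (decide (a ∉ V ∧ a ≠ n)) = (decide (a ∉ V)) := by
          by_cases ha : a ∈ V <;> simp [ha, han]
        simp only [List.filter_cons, heq]
        by_cases ha : (decide (a ∉ V)) = true
        · simp only [ha, if_true, List.length_cons]
          have := ih hmm
          omega
        · simp only [ha, if_false]
          exact ih hmm

theorem pvU_add {D : PySem.Dict (Int × Int) String} {V : PySem.Set (Int × Int)} {n : Int × Int}
    (hm : n ∈ PySem.Dict.keys D) (hc : n ∉ V) :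
    pvU D (PySem.Set.add V n) + 1 ≤ pvU D V := by
  unfold pvU
  have h1 : (PySem.Dict.keys D).filter (fun k => !(PySem.Set.contains (PySem.Set.add V n) k)) =
      (PySem.Dict.keys D).filter (fun k => decide (k ∉ V ∧ k ≠ n)) := by
    apply List.filter_congr
    intro x _
    by_cases hx : x ∈ PySem.Set.add V n
    · have : PySem.Set.contains (PySem.Set.add V n) x = true :=
        (PySem.Set.contains_iff _ x).mpr hx
      rw [PySem.Set.mem_add] at hx
      simp only [this, Bool.not_true]
      rcases hx with hx | hx
      · simp [hx]
      · simp [hx]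
    · have : PySem.Set.contains (PySem.Set.add V n) x = false := by
        rw [← Bool.not_eq_true]
        intro hcon
        exact hx ((PySem.Set.contains_iff _ x).mp hcon)
      rw [PySem.Set.mem_add] at hx
      push_neg at hx
      simp [this, hx.1, hx.2]
  have h2 : (PySem.Dict.keys D).filter (fun k => !(PySem.Set.contains V k)) =
      (PySem.Dict.keys D).filter (fun k => decide (k ∉ V)) := by
    apply List.filter_congr
    intro x _
    by_cases hx : x ∈ V
    · simp [(PySem.Set.contains_iff V x).mpr hx, hx]
    · have : PySem.Set.contains V x = false := by
        rw [← Bool.not_eq_true]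
        intro hcon
        exact hx ((PySem.Set.contains_iff V x).mp hcon)
      simp [this, hx]
  rw [h1, h2]
  exact pvFilter_len hm hc

-- accumulator lemma for B's inner loop
theorem pvExpandB_acc (D : PySem.Dict (Int × Int) String) :
    ∀ (ns nxt : List (Int × Int)) (V : PySem.Set (Int × Int)),
    pvExpandB D ns nxt V = (nxt ++ (pvExpandB D ns [] V).1, (pvExpandB D ns [] V).2) := by
  intro ns
  induction ns with
  | nil => intro nxt V; simp [pvExpandB]
  | cons n ns ih =>
      intro nxt V
      by_cases h : pvOk D V n = true
      · rw [pvExpandB, pvExpandB, if_pos h, if_pos h, ih, ih ([] ++ [n])]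
        simp
      · rw [pvExpandB, pvExpandB, if_neg h, if_neg h, ih]

-- A's inner loop is B's inner loop with (·, steps+1) pairs appended to the queue
theorem pvExpandA_corr (D : PySem.Dict (Int × Int) String) (steps : Int) :
    ∀ (ns : List (Int × Int)) (q : List ((Int × Int) × Int)) (V : PySem.Set (Int × Int)),
    pvExpandA D steps ns q V =
      (q ++ ((pvExpandB D ns [] V).1).map (fun n => (n, steps + 1)), (pvExpandB D ns [] V).2) := by
  intro ns
  induction ns with
  | nil => intro q V; simp [pvExpandA, pvExpandB]
  | cons n ns ih =>
      intro q V
      by_cases h : pvOk D V n = true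
      · rw [pvExpandA, pvExpandB, if_pos h, if_pos h, ih, pvExpandB_acc D ns ([] ++ [n])]
        simp
      · rw [pvExpandA, pvExpandB, if_neg h, if_neg h, ih]

-- accumulator lemma for B's outer (per-level) loop
theorem pvLevelB_acc (D : PySem.Dict (Int × Int) String) :
    ∀ (F nxt : List (Int × Int)) (V : PySem.Set (Int × Int)),
    pvLevelB D F nxt V = (nxt ++ (pvLevelB D F [] V).1, (pvLevelB D F [] V).2) := by
  intro F
  induction F with
  | nil => intro nxt V; simp [pvLevelB]
  | cons p F ih =>
      intro nxt V
      rw [pvLevelB, pvLevelB, pvExpandB_acc D (pvNbrs p) nxt V]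
      dsimp only
      rw [ih (nxt ++ (pvExpandB D (pvNbrs p) [] V).1) ((pvExpandB D (pvNbrs p) [] V).2),
        ih ((pvExpandB D (pvNbrs p) [] V).1) ((pvExpandB D (pvNbrs p) [] V).2)]
      simp

-- visited-accounting for B's inner loop: every appended node consumes an unvisited grid key
theorem pvExpandB_u (D : PySem.Dict (Int × Int) String) :
    ∀ (ns : List (Int × Int)) (V : PySem.Set (Int × Int)),
    pvU D (pvExpandB D ns [] V).2 + (pvExpandB D ns [] V).1.length ≤ pvU D V := by
  intro ns
  induction ns with
  | nil => simp [pvExpandB]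
  | cons n ns ih =>
      intro V
      by_cases h : pvOk D V n = true
      · rw [pvExpandB, if_pos h, pvExpandB_acc]
        obtain ⟨hm, hc⟩ := pvOk_facts h
        have h1 := pvU_add hm hc
        have h2 := ih (PySem.Set.add V n)
        simp only [List.length_append, List.length_cons, List.length_nil]
        omega
      · rw [pvExpandB, if_neg h]
        exact ih V

-- visited-accounting for a whole level
theorem pvLevelB_u (D : PySem.Dict (Int × Int) String) :
    ∀ (F : List (Int × Int)) (V : PySem.Set (Int × Int)),
    pvU D (pvLevelB D F [] V).2 + (pvLevelB D F [] V).1.length ≤ pvU D V := by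
  intro F
  induction F with
  | nil => simp [pvLevelB]
  | cons p F ih =>
      intro V
      rw [pvLevelB]
      rw [pvLevelB_acc D F ((pvExpandB D (pvNbrs p) [] V).1)]
      have h1 := pvExpandB_u D (pvNbrs p) V
      have h2 := ih (pvExpandB D (pvNbrs p) [] V).2
      simp only [List.length_append]
      omega

theorem pvLoopA_nil (D : PySem.Dict (Int × Int) String) (end_ : Int × Int) (limit : Int)
    (V : PySem.Set (Int × Int)) : ∀ f, pvLoopA D end_ limit f [] V = -1 := by
  intro f; cases f <;> rfl

-- once every queued entry has steps ≥ limit the queue just drains to -1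
theorem pvLoopA_drain (D : PySem.Dict (Int × Int) String) (end_ : Int × Int) (limit : Int) :
    ∀ (Q : List ((Int × Int) × Int)) (f : Nat) (V : PySem.Set (Int × Int)),
    Q.length ≤ f → (∀ c ∈ Q, limit ≤ c.2) → pvLoopA D end_ limit f Q V = -1 := by
  intro Q
  induction Q with
  | nil => intro f V _ _; exact pvLoopA_nil D end_ limit V f
  | cons c rest ih =>
      intro f V hf hall
      match f with
      | g + 1 =>
          rw [pvLoopA, if_pos (hall c (by simp))]
          exact ih g V (by simpa using hf) (fun c hc => hall c (List.mem_cons_of_mem _ hc))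

-- processing one whole level of A's queue = B's level step
theorem pvLevelStep (D : PySem.Dict (Int × Int) String) (end_ : Int × Int) (limit : Int)
    (d : Int) (hd : d < limit) :
    ∀ (F₁ F₂ : List (Int × Int)) (V : PySem.Set (Int × Int)) (f : Nat),
    pvLoopA D end_ limit (f + F₁.length)
        (F₁.map (fun p => (p, d)) ++ F₂.map (fun p => (p, d + 1))) V =
      if end_ ∈ F₁ then d
      else pvLoopA D end_ limit f
          ((F₂ ++ (pvLevelB D F₁ [] V).1).map (fun p => (p, d + 1))) (pvLevelB D F₁ [] V).2 := by
  intro F₁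
  induction F₁ with
  | nil => intro F₂ V f; simp [pvLevelB]
  | cons p F ih =>
      intro F₂ W f
      simp only [List.length_cons, List.map_cons, List.cons_append]
      have hfuel : f + (F.length + 1) = (f + F.length) + 1 := by omega
      rw [hfuel, pvLoopA]
      simp only [not_le.mpr hd, if_false]
      by_cases hp : p = end_
      · subst hp
        simp [List.mem_cons]
      · simp only [hp, if_false]
        rw [pvExpandA_corr]
        have hq : F₂.map (fun p => (p, d + 1)) ++
            ((pvExpandB D (pvNbrs p) [] W).1).map (fun n => (n, d + 1)) =
            (F₂ ++ (pvExpandB D (pvNbrs p) [] W).1).map (fun p => (p, d + 1)) := by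
          simp
        rw [List.append_assoc, hq, ih]
        have hlev : pvLevelB D (p :: F) [] W =
            ((pvExpandB D (pvNbrs p) [] W).1 ++ (pvLevelB D F [] (pvExpandB D (pvNbrs p) [] W).2).1,
             (pvLevelB D F [] (pvExpandB D (pvNbrs p) [] W).2).2) := by
          rw [pvLevelB]
          rw [pvLevelB_acc]
        rw [hlev]
        dsimp only
        by_cases he : end_ ∈ F
        · rw [if_pos he, if_pos (by simp [he])]
        · have hne : end_ ∉ p :: F := by
            intro hmem
            rcases List.mem_cons.mp hmem with h | h
            · exact hp h.symm
            · exact he h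
          rw [if_neg he, if_neg hne, List.append_assoc]

-- the main correspondence: from a level start, A's queue loop = B's frontier loop
theorem pvMain (D : PySem.Dict (Int × Int) String) (end_ : Int × Int) (limit : Int) :
    ∀ (k : Nat) (d : Int) (F : List (Int × Int)) (V : PySem.Set (Int × Int)) (f : Nat),
    (limit - d).toNat ≤ k → F.length + pvU D V ≤ f →
    pvLoopA D end_ limit f (F.map (fun p => (p, d))) V = pvLoopB D end_ limit d F V := by
  intro k
  induction k with
  | zero =>
      intro d F V f hk hf
      have hlim : limit ≤ d := by omega
      rw [pvLoopB]
      rw [dif_pos (Or.inr hlim)]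
      exact pvLoopA_drain D end_ limit _ f V (by simpa using (by omega : F.length ≤ f))
        (by intro c hc; simp only [List.mem_map] at hc; obtain ⟨p, _, rfl⟩ := hc; exact hlim)
  | succ k ih =>
      intro d F V f hk hf
      by_cases hF : F = []
      · subst hF
        rw [pvLoopB, dif_pos (Or.inl rfl)]
        simpa using pvLoopA_nil D end_ limit V f
      · by_cases hlim : limit ≤ d
        · rw [pvLoopB, dif_pos (Or.inr hlim)]
          exact pvLoopA_drain D end_ limit _ f V (by simpa using (by omega : F.length ≤ f))
            (by intro c hc; simp only [List.mem_map] at hc; obtain ⟨p, _, rfl⟩ := hc; exact hlim)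
        · have hd : d < limit := lt_of_not_ge hlim
          have hsplit : f = (f - F.length) + F.length := by omega
          have hstep := pvLevelStep D end_ limit d hd F [] V (f - F.length)
          simp only [List.map_nil, List.append_nil, List.nil_append] at hstep
          rw [hsplit, hstep]
          rw [pvLoopB, dif_neg (by push_neg; exact ⟨hF, by omega⟩)]
          by_cases he : end_ ∈ F
          · simp [he]
          · simp only [he, if_false]
            have hu := pvLevelB_u D F V
            exact ih (d + 1) (pvLevelB D F [] V).1 (pvLevelB D F [] V).2 (f - F.length)
              (by omega) (by omega)

theorem pvU_empty_le (grid : List (Int × Int × String)) :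
    pvU (pvGrid grid) PySem.Set.empty ≤ grid.length := by
  unfold pvU
  have hfil : ((PySem.Dict.keys (pvGrid grid)).filter
      (fun k => !(PySem.Set.contains PySem.Set.empty k))).length =
      (PySem.Dict.keys (pvGrid grid)).length := by
    have : ∀ (K : List (Int × Int)),
        (K.filter (fun k => !(PySem.Set.contains PySem.Set.empty k))).length = K.length := by
      intro K
      induction K with
      | nil => rfl
      | cons a K ih =>
          have : PySem.Set.contains PySem.Set.empty a = false := by
            rw [← Bool.not_eq_true, PySem.Set.contains_iff]
            simp [PySem.Set.empty]
          simp [List.filter_cons, this, ih]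
    exact this _
  rw [hfil]
  unfold pvGrid
  have : ∀ (l : List (Int × Int × String)) (d : PySem.Dict (Int × Int) String),
      (PySem.Dict.keys (l.foldl (fun d e => PySem.Dict.insert d (e.1, e.2.1) e.2.2) d)).length ≤
        (PySem.Dict.keys d).length + l.length := by
    intro l
    induction l with
    | nil => intro d; simp
    | cons e l ih =>
        intro d
        simp only [List.foldl_cons, List.length_cons]
        have step : (PySem.Dict.keys (PySem.Dict.insert d (e.1, e.2.1) e.2.2)).length ≤
            (PySem.Dict.keys d).length + 1 := by
          by_cases hc : PySem.Dict.contains d (e.1, e.2.1) = true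
          · rw [PySem.Dict.keys_insert_of_contains d e.2.2 hc]; omega
          · rw [PySem.Dict.keys_insert_of_not_contains d e.2.2 (by simpa using hc)]
            simp
        have := ih (PySem.Dict.insert d (e.1, e.2.1) e.2.2)
        omega
  have h0 := this grid PySem.Dict.empty
  simpa [PySem.Dict.keys_empty] using h0

-- ===== VERDICT (by name: the statement is the Claim_ definition above) =====
theorem bfs_constrained_py_spec : Claim_equal_bfs_constrained_py := by
  intro grid start end_ limit _
  unfold Spec_bfs_constrained_py bfs_constrained_py bfs_constrained_py_alt
  have h := pvMain (pvGrid grid) end_ limit (limit - 0).toNat 0 [start] PySem.Set.empty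
      (grid.length + 2) (le_refl _)
      (by have := pvU_empty_le grid; simp only [List.length_cons, List.length_nil]; omega)
  simpa using h
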